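-- pv_equiv track=rewrite | github.com/PrefLib/preflibtools | preflibtools/properties/subdomains/ordinal/singlepeaked/k_alternative_deletion.py | get_L_sets
-- ===== SOURCE A (Python) =====
-- def get_L_sets(alternatives, unique_votes):
--     """
--     A helper function for the k-alternative deletion algorithm.
--     Generates the set of sets of alternatives, based on what their lowest rank
--     is among all votes. See Erdélyi, Lackner, Pfandler (2017) for details.
--
--     :param alternatives: The (sub)set of alternatives to apply the algorithm on.
--     :type alternatives: list.
--     :param unique_votes: The unique orders within the profile.
--     :type unique_votes: list(list)
--
--     :return: A dictionary of sets, such that the i-th set contains the alternatives placed last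
--         after i-1 last placed alternative removals.
--     :rtype: dict(set)
--     """
--     L = dict()
--     m = len(alternatives)
--
--     votes_copy = list(unique_votes)
--     previous_last = set()
--     last = set()
--
--     for j in range(1, m + 1):
--         for i in range(len(votes_copy)):
--             new_order = [a for a in votes_copy[i] if a not in previous_last and a in alternatives]
--
--             if len(new_order) > 0:
--                 last.add(new_order[-1])
--             votes_copy[i] = new_order
--
--         L[j] = last
--         previous_last = last
--         last = set()
--
--     return L
-- ===== SOURCE B (Python) =====
-- def get_L_sets(alternatives, unique_votes):
--     alts = set(alternatives)
--     # per-vote stack of the alternatives-filtered vote; trimmed destructively from the end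
--     stacks = [[a for a in v if a in alts] for v in unique_votes]
--     L = {}
--     removed = set()
--     j = 1
--     for _ in range(len(alternatives)):
--         last = set()
--         for st in stacks:
--             while st and st[-1] in removed:
--                 st.pop()
--             if st:
--                 last.add(st[-1])
--         L[j] = last
--         j += 1
--         removed |= last
--     return L
-- ===== Notes on version B (the rewrite author's own statement) =====
-- stated objective: faster
-- what changed: Instead of rebuilding every filtered vote from scratch in each of the m rounds, B builds one alternatives-filtered stack per vote once and in each round destructively pops already-removed elements off each stack's end, so every vote element is popped at most once overall.
import Mathlib
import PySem

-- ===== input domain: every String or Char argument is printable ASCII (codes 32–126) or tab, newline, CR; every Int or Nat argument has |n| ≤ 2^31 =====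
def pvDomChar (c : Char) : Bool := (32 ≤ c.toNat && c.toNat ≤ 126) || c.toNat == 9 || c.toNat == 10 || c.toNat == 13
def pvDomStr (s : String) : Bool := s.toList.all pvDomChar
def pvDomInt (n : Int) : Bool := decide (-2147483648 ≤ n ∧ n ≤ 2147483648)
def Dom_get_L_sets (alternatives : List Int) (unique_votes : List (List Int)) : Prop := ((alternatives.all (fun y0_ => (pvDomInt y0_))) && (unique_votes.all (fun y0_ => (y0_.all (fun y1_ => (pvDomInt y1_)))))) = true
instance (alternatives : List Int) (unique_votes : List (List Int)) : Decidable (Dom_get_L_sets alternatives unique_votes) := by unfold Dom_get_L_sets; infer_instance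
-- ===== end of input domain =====

-- B replaces A's per-round rebuilding of every filtered vote (O(V·m) work per round) by one
-- alternatives-filtered stack per vote, popped destructively from the end across rounds.

-- ===== PORT A =====
-- body of A's inner loop: votes_copy[i] is read, filtered, written back; `last` is updated
def pvStepA (alternatives : List Int) (previous_last : PySem.Set Int)
    (st : List (List Int) × PySem.Set Int) (v : List Int) :
    List (List Int) × PySem.Set Int :=
  let new_order := v.filter (fun a => !(PySem.Set.contains previous_last a) && alternatives.contains a)
  (st.1 ++ [new_order],
    if 0 < new_order.length then PySem.Set.add st.2 (PySem.List.pyGetD new_order (-1) 0) else st.2)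

-- body of A's outer loop over j: one removal round (state = (L, votes_copy, previous_last))
def pvOuterA (alternatives : List Int)
    (st : List (Int × List Int) × List (List Int) × PySem.Set Int) (j : Int) :
    List (Int × List Int) × List (List Int) × PySem.Set Int :=
  let r := st.2.1.foldl (pvStepA alternatives st.2.2) ([], PySem.Set.empty)
  (st.1 ++ [(j, r.2)], r.1, r.2)

def get_L_sets (alternatives : List Int) (unique_votes : List (List Int)) : List (Int × List Int) :=
  let m := alternatives.length
  ((PySem.List.pyRange 1 ((m : Int) + 1) 1).foldl (pvOuterA alternatives)
    ([], unique_votes, PySem.Set.empty)).1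

-- ===== PORT B =====
-- B's `while st and st[-1] in removed: st.pop()`: pop the stack's last element while it is removed
def pvTrim (removed : PySem.Set Int) (l : List Int) : List Int :=
  match hl : l.getLast? with
  | some a => if PySem.Set.contains removed a then pvTrim removed l.dropLast else l
  | none => l
termination_by l.length
decreasing_by
  have hne : l ≠ [] := by intro h; subst h; simp at hl
  have : 0 < l.length := List.length_pos_iff.mpr hne
  simp [List.length_dropLast]; omega

-- B's inner `for st in sks` loop, one recursive pass: trims each stack, collects `last`
def pvRoundB (removed last : PySem.Set Int) : List (List Int) → PySem.Set Int × List (List Int)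
  | [] => (last, [])
  | s :: ss =>
    let s' := pvTrim removed s
    let last' := match s'.getLast? with
      | some a => PySem.Set.add last a
      | none => last
    let r := pvRoundB removed last' ss
    (r.1, s' :: r.2)

-- B's outer loop: round countdown (`for _ in range(len(alternatives))`), j the running key
def pvRoundsB : Nat → Int → PySem.Set Int → List (List Int) → List (Int × List Int)
  | 0, _, _, _ => []
  | n + 1, j, removed, sks =>
    let r := pvRoundB removed PySem.Set.empty sks
    (j, r.1) :: pvRoundsB n (j + 1) (PySem.Set.update removed r.1) r.2

def get_L_sets_alt (alternatives : List Int) (unique_votes : List (List Int)) : List (Int × List Int) :=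
  let alts := PySem.Set.ofList alternatives
  let sks := unique_votes.map (fun v => v.filter (fun a => PySem.Set.contains alts a))
  pvRoundsB alternatives.length 1 PySem.Set.empty sks

-- ===== PRECONDITION & SPEC =====
def Spec_get_L_sets (alternatives : List Int) (unique_votes : List (List Int)) (out : List (Int × List Int)) : Prop := out = get_L_sets_alt alternatives unique_votes
instance (alternatives : List Int) (unique_votes : List (List Int)) (out : List (Int × List Int)) : Decidable (Spec_get_L_sets alternatives unique_votes out) := by unfold Spec_get_L_sets; infer_instance

-- ===== CLAIM (what is proved, stated in full; the proofs are below) =====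
def Claim_equal_get_L_sets : Prop := ∀ (alternatives : List Int) (unique_votes : List (List Int)), Dom_get_L_sets alternatives unique_votes → Spec_get_L_sets alternatives unique_votes (get_L_sets alternatives unique_votes)

-- ===== LEMMAS AND PROOFS =====

-- A's per-vote filter at one round
def pvFA (alternatives : List Int) (prev : PySem.Set Int) (v : List Int) : List Int :=
  v.filter (fun a => !(PySem.Set.contains prev a) && alternatives.contains a)

-- the cumulative filter both rounds amount to
def pvFilt (rem : PySem.Set Int) (f : List Int) : List Int :=
  f.filter (fun a => !(PySem.Set.contains rem a))

def pvAddOpt (s : PySem.Set Int) : Option Int → PySem.Set Int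
  | some x => PySem.Set.add s x
  | none => s

-- B-side invariant: the stack s is f minus a suffix of already-removed elements
def pvQ (rem : PySem.Set Int) (s f : List Int) : Prop :=
  ∃ l₂, f = s ++ l₂ ∧ ∀ a ∈ l₂, PySem.Set.contains rem a = true

lemma pvStepA_eq (alts : List Int) (prev : PySem.Set Int)
    (st : List (List Int) × PySem.Set Int) (v : List Int) :
    pvStepA alts prev st v = (st.1 ++ [pvFA alts prev v], pvAddOpt st.2 (pvFA alts prev v).getLast?) := by
  simp only [pvStepA, pvFA]
  rcases h : v.filter (fun a => !(PySem.Set.contains prev a) && alts.contains a) with _ | ⟨a, l⟩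
  · simp [pvAddOpt]
  · simp [pvAddOpt, PySem.List.pyGetD_neg_one (a :: l) 0 (by simp),
      List.getLast?_eq_some_getLast (l := a :: l) (by simp)]

lemma pvRoundA_eq (alts : List Int) (prev : PySem.Set Int) :
    ∀ (vc : List (List Int)) (acc : List (List Int)) (s : PySem.Set Int),
    vc.foldl (pvStepA alts prev) (acc, s) =
      (acc ++ vc.map (pvFA alts prev),
       ((vc.map (pvFA alts prev)).map List.getLast?).foldl pvAddOpt s) := by
  intro vc
  induction vc with
  | nil => intro acc s; simp
  | cons v vc ih =>
      intro acc s
      simp only [List.foldl_cons, pvStepA_eq, List.map_cons, ih]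
      simp [List.append_assoc]

lemma pvTrim_rev (rem : PySem.Set Int) (r : List Int) :
    pvTrim rem r.reverse = (r.dropWhile (fun a => PySem.Set.contains rem a)).reverse := by
  induction r with
  | nil => rw [pvTrim]; simp
  | cons a r ih =>
      rw [pvTrim, List.dropWhile_cons]
      split
      · rename_i a' hl'
        have ha : a = a' := by
          rw [List.reverse_cons] at hl'
          simpa using hl'
        subst ha
        rw [List.reverse_cons, List.dropLast_concat]
        by_cases hc : PySem.Set.contains rem a = true
        · simp only [hc, if_true, ih]
        · have hno : a ∉ rem := by
            cases h : PySem.Set.contains rem a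
            · simpa [PySem.Set.contains_eq_listContains] using h
            · exact absurd h hc
          simp [hno]
      · rename_i hl'
        rw [List.reverse_cons] at hl'
        simp at hl'

lemma pvTrim_eq (rem : PySem.Set Int) (l : List Int) :
    pvTrim rem l = (l.reverse.dropWhile (fun a => PySem.Set.contains rem a)).reverse := by
  conv_lhs => rw [← List.reverse_reverse l]
  exact pvTrim_rev rem l.reverse

lemma pvHead_dropWhile_filter (p : Int → Bool) (l : List Int) :
    (l.dropWhile p).head? = (l.filter (fun a => !p a)).head? := by
  induction l with
  | nil => rfl
  | cons a l ih =>
      simp only [List.dropWhile_cons, List.filter_cons]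
      cases h : p a <;> simp [ih]

lemma pvTrim_getLast? (rem : PySem.Set Int) (l : List Int) :
    (pvTrim rem l).getLast? = (pvFilt rem l).getLast? := by
  rw [pvTrim_eq, List.getLast?_reverse,
    pvHead_dropWhile_filter (fun a => PySem.Set.contains rem a) l.reverse]
  simp only [pvFilt, List.filter_reverse, List.head?_reverse]

lemma pvTrim_spec (rem : PySem.Set Int) (l : List Int) :
    ∃ l₃, l = pvTrim rem l ++ l₃ ∧ ∀ a ∈ l₃, PySem.Set.contains rem a = true := by
  refine ⟨(l.reverse.takeWhile (fun a => PySem.Set.contains rem a)).reverse, ?_, ?_⟩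
  · rw [pvTrim_eq, ← List.reverse_append, List.takeWhile_append_dropWhile, List.reverse_reverse]
  · intro a ha
    rw [List.mem_reverse] at ha
    exact List.mem_takeWhile_imp ha

lemma pvContains_update (s : PySem.Set Int) (xs : List Int) (a : Int) :
    PySem.Set.contains (PySem.Set.update s xs) a = (PySem.Set.contains s a || PySem.Set.contains xs a) := by
  rw [Bool.eq_iff_iff]
  simp [PySem.Set.mem_update]

lemma pvQ_step (rem x : PySem.Set Int) (s f : List Int) (h : pvQ rem s f) :
    pvQ (PySem.Set.update rem x) (pvTrim rem s) f := by
  obtain ⟨l₂, hf, hmem⟩ := h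
  obtain ⟨l₃, hs, hm₃⟩ := pvTrim_spec rem s
  refine ⟨l₃ ++ l₂, ?_, ?_⟩
  · rw [hf]; conv_lhs => rw [hs]
    rw [List.append_assoc]
  intro a ha
  rw [pvContains_update]
  rcases List.mem_append.mp ha with ha | ha
  · rw [hm₃ a ha]; simp
  · rw [hmem a ha]; simp

-- per-vote: B's trimmed stack top equals the last element of A's cumulatively filtered vote
lemma pvLast_eq (rem : PySem.Set Int) (s f : List Int) (h : pvQ rem s f) :
    (pvTrim rem s).getLast? = (pvFilt rem f).getLast? := by
  obtain ⟨l₂, hf, hmem⟩ := h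
  have h2 : l₂.filter (fun a => !(PySem.Set.contains rem a)) = [] := by
    rw [List.filter_eq_nil_iff]
    intro a ha
    have h := hmem a ha
    simp [PySem.Set.contains_eq_listContains] at h
    simp [h]
  rw [pvTrim_getLast?, hf]
  simp only [pvFilt, List.filter_append]
  rw [h2, List.append_nil]

lemma pvRoundB_eq (rem : PySem.Set Int) :
    ∀ (ss : List (List Int)) (last : PySem.Set Int),
    pvRoundB rem last ss =
      (((ss.map (pvTrim rem)).map List.getLast?).foldl pvAddOpt last, ss.map (pvTrim rem)) := by
  intro ss
  induction ss with
  | nil => intro last; rfl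
  | cons s ss ih =>
      intro last
      simp only [pvRoundB, List.map_cons, List.foldl_cons, ih]
      rcases h : (pvTrim rem s).getLast? with _ | a <;> simp [pvAddOpt]

lemma pvLasts_map (rem : PySem.Set Int) :
    ∀ {sks fs : List (List Int)}, List.Forall₂ (pvQ rem) sks fs →
    (sks.map (pvTrim rem)).map List.getLast? = (fs.map (pvFilt rem)).map List.getLast? := by
  intro sks fs h
  induction h with
  | nil => rfl
  | cons h _ ih => simp only [List.map_cons, ih, pvLast_eq _ _ _ h]

lemma pvForall₂_step (rem x : PySem.Set Int) :
    ∀ {sks fs : List (List Int)}, List.Forall₂ (pvQ rem) sks fs →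
    List.Forall₂ (pvQ (PySem.Set.update rem x)) (sks.map (pvTrim rem)) fs := by
  intro sks fs h
  induction h with
  | nil => exact List.Forall₂.nil
  | cons h _ ih => exact List.Forall₂.cons (pvQ_step _ _ _ _ h) ih

-- A's next-round filter on an already filtered vote = the cumulative filter
lemma pvFA_filt (alts : List Int) (s rem : PySem.Set Int) (f : List Int)
    (hf : ∀ a ∈ f, alts.contains a = true) :
    pvFA alts s (pvFilt rem f) = pvFilt (PySem.Set.update rem s) f := by
  simp only [pvFA, pvFilt, List.filter_filter]
  refine List.filter_congr ?_
  intro a ha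
  have h1 : decide (a ∈ alts) = true := by simpa using hf a ha
  rw [pvContains_update]
  simp [h1, Bool.not_or, Bool.and_comm]

lemma pvMain (alts : List Int) (fs : List (List Int))
    (Hf : ∀ f ∈ fs, ∀ a ∈ f, alts.contains a = true) :
    ∀ (n : Nat) (j : Int) (LA : List (Int × List Int)) (vc sks : List (List Int))
      (prev rem : PySem.Set Int),
    vc.map (pvFA alts prev) = fs.map (pvFilt rem) →
    List.Forall₂ (pvQ rem) sks fs →
    ((PySem.List.pyRange j (j + n) 1).foldl (pvOuterA alts) (LA, vc, prev)).1
      = LA ++ pvRoundsB n j rem sks := by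
  intro n
  induction n with
  | zero => intro j LA vc sks prev rem _ _; simp [pvRoundsB]
  | succ n ih =>
      intro j LA vc sks prev rem hA hB
      have hcons : PySem.List.pyRange j (j + (n + 1 : Nat)) 1
          = j :: PySem.List.pyRange (j + 1) (j + (n + 1 : Nat)) 1 :=
        PySem.List.pyRange_one_cons (by push_cast; omega)
      have hlasts : (vc.map (pvFA alts prev)).map List.getLast?
          = (sks.map (pvTrim rem)).map List.getLast? := by
        rw [hA, pvLasts_map rem hB]
      have h1 : List.map (pvFA alts (List.foldl pvAddOpt PySem.Set.empty (List.map List.getLast? (List.map (pvTrim rem) sks)))) (List.map (pvFA alts prev) vc)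
          = List.map (pvFilt (PySem.Set.update rem (List.foldl pvAddOpt PySem.Set.empty (List.map List.getLast? (List.map (pvTrim rem) sks))))) fs := by
        rw [hA, List.map_map]
        refine List.map_congr_left ?_
        intro f hf
        exact pvFA_filt alts _ rem f (Hf f hf)
      have h2 : List.Forall₂ (pvQ (PySem.Set.update rem (List.foldl pvAddOpt PySem.Set.empty (List.map List.getLast? (List.map (pvTrim rem) sks)))))
          (List.map (pvTrim rem) sks) fs := pvForall₂_step rem _ hB
      have hrange : j + ((n + 1 : Nat) : Int) = (j + 1) + (n : Nat) := by push_cast; ring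
      rw [hcons, List.foldl_cons]
      simp only [pvOuterA, pvRoundsB]
      rw [pvRoundA_eq, pvRoundB_eq]
      simp only [List.nil_append]
      rw [hlasts, hrange,
        ih (j + 1) (LA ++ [(j, (List.foldl pvAddOpt PySem.Set.empty (List.map List.getLast? (List.map (pvTrim rem) sks))))]) (List.map (pvFA alts prev) vc)
          (List.map (pvTrim rem) sks) (List.foldl pvAddOpt PySem.Set.empty (List.map List.getLast? (List.map (pvTrim rem) sks))) (PySem.Set.update rem (List.foldl pvAddOpt PySem.Set.empty (List.map List.getLast? (List.map (pvTrim rem) sks)))) h1 h2]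
      simp

-- ===== VERDICT (by name: the statement is the Claim_ definition above) =====
theorem get_L_sets_spec : Claim_equal_get_L_sets := by
  intro alternatives unique_votes _hdom
  show get_L_sets alternatives unique_votes = get_L_sets_alt alternatives unique_votes
  have hfs : ∀ f ∈ unique_votes.map (fun v => v.filter (fun a => PySem.Set.contains (PySem.Set.ofList alternatives) a)),
      ∀ a ∈ f, alternatives.contains a = true := by
    intro f hf a ha
    obtain ⟨v, _, rfl⟩ := List.mem_map.mp hf
    have h2 := (List.mem_filter.mp ha).2
    simp only [PySem.Set.contains_eq_listContains, List.contains_eq_mem, decide_eq_true_eq,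
      PySem.Set.mem_ofList] at h2 ⊢
    exact h2
  have hA0 : unique_votes.map (pvFA alternatives PySem.Set.empty)
      = (unique_votes.map (fun v => v.filter (fun a => PySem.Set.contains (PySem.Set.ofList alternatives) a))).map (pvFilt PySem.Set.empty) := by
    rw [List.map_map]
    refine List.map_congr_left ?_
    intro v _
    simp only [Function.comp, pvFA, pvFilt, List.filter_filter]
    refine List.filter_congr ?_
    intro a _
    simp [PySem.Set.contains_eq_listContains, PySem.Set.mem_ofList, PySem.Set.empty]
  have hB0 : List.Forall₂ (pvQ PySem.Set.empty)
      (unique_votes.map (fun v => v.filter (fun a => PySem.Set.contains (PySem.Set.ofList alternatives) a)))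
      (unique_votes.map (fun v => v.filter (fun a => PySem.Set.contains (PySem.Set.ofList alternatives) a))) := by
    rw [List.forall₂_same]
    intro x _
    exact ⟨[], by simp, by simp⟩
  have h := pvMain alternatives _ hfs alternatives.length 1 [] unique_votes _
    PySem.Set.empty PySem.Set.empty hA0 hB0
  simp only [get_L_sets, get_L_sets_alt]
  rw [show ((alternatives.length : Int) + 1) = 1 + (alternatives.length : Nat) by ring]
  simpa using h
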